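-- pv_equiv track=rewrite | github.com/icacedo/splicing | allpossible_v2.py | find_sites
-- ===== SOURCE A (Python) =====
-- def find_sites(seq,minexon):
--
-- 	don_sites=[]
-- 	acc_sites=[]
-- 	for i in range(minexon,len(seq)-minexon):
-- 		if seq[i:i+2]=='GT':
-- 			don_sites.append(i)
-- 		if seq[i:i+2]=='AG':
-- 			acc_sites.append(i)
-- 		else:continue
-- 	yield don_sites,acc_sites
-- ===== SOURCE B (Python) =====
-- def find_sites(seq, minexon):
--     n = len(seq)
--
--     def scan(pat):
--         sites = []
--         pos = minexon
--         while True: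
--             i = seq.find(pat, pos)
--             if i == -1 or i >= n - minexon:
--                 break
--             sites.append(i)
--             pos = i + 1
--         return sites
--
--     yield scan('GT'), scan('AG')
-- ===== Notes on version B (the rewrite author's own statement) =====
-- stated objective: alternative
-- what changed: Instead of one index loop over range(minexon, len-minexon) slicing seq[i:i+2] and testing both patterns at every position, B runs two independent str.find passes that jump from match to match ('GT' then 'AG'), collecting indices until a match reaches len(seq)-minexon.
-- outside the precondition, e.g. on find_sites('GTAA', -4): A returns [([-4, 0], [])], B returns [([0], [])]
import Mathlib
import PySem

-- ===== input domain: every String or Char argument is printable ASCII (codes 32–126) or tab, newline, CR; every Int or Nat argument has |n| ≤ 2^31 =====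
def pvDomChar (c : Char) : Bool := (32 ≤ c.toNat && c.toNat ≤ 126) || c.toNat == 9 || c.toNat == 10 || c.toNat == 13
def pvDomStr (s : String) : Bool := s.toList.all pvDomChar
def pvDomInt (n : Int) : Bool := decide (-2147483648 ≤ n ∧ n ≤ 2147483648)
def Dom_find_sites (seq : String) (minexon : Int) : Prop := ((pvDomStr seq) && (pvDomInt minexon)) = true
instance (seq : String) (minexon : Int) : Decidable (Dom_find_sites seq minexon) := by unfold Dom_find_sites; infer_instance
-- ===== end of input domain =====

-- B replaces A's single index loop (slicing seq[i:i+2] and testing both patterns at every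
-- position) by two independent str.find passes that jump from match to match; same return value.

-- ===== PORT A =====
-- One loop over range(minexon, len(seq)-minexon), appending i to don_sites on 'GT' and to
-- acc_sites on 'AG'; the generator's single yield becomes a one-element list.
def find_sites (seq : String) (minexon : Int) : List (List Int × List Int) :=
  let s := seq.toList
  let st := (PySem.List.pyRange minexon ((s.length : Int) - minexon) 1).foldl
    (fun (st : List Int × List Int) i =>
      let st1 := if PySem.Chars.slice s (some i) (some (i + 2)) = "GT".toList then (st.1 ++ [i], st.2) else st
      if PySem.Chars.slice s (some i) (some (i + 2)) = "AG".toList then (st1.1, st1.2 ++ [i]) else st1)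
    ([], [])
  [st]

-- ===== PORT B =====
-- while True: i = seq.find(pat, pos); if i == -1 or i >= stop: break; sites.append(i); pos = i+1
-- (fuel only makes the loop total; len(seq)+2 steps always suffice, since each found index
-- is < len(seq) and pos strictly increases)
def scanSites (fuel : Nat) (s pat : List Char) (stop : Int) (pos : Int) : List Int :=
  match fuel with
  | 0 => []
  | fuel + 1 =>
    let i := PySem.Chars.findFrom s pat pos
    if i = -1 ∨ stop ≤ i then []
    else i :: scanSites fuel s pat stop (i + 1)

def find_sites_alt (seq : String) (minexon : Int) : List (List Int × List Int) :=
  let n : Int := PySem.Str.len seq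
  [(scanSites (seq.toList.length + 2) seq.toList "GT".toList (n - minexon) minexon,
    scanSites (seq.toList.length + 2) seq.toList "AG".toList (n - minexon) minexon)]

-- ===== PRECONDITION & SPEC =====
-- Pre_ excludes negative minexon: a minimum exon length is a nonnegative count, and for
-- minexon < 0 A's loop visits negative indices where Python's negative-slice wraparound makes
-- A report matches at negative positions — an artefact of A's implementation; B scans from the
-- start of the string there.
def Pre_find_sites (seq : String) (minexon : Int) : Prop := 0 ≤ minexon
instance (seq : String) (minexon : Int) : Decidable (Pre_find_sites seq minexon) := by unfold Pre_find_sites; infer_instance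
def pvWitness_find_sites : String × Int := ("GTAAGTAG", 1)
def Spec_find_sites (seq : String) (minexon : Int) (out : List (List Int × List Int)) : Prop := out = find_sites_alt seq minexon
instance (seq : String) (minexon : Int) (out : List (List Int × List Int)) : Decidable (Spec_find_sites seq minexon out) := by unfold Spec_find_sites; infer_instance

-- ===== CLAIM (what is proved, stated in full; the proofs are below) =====
def Claim_equal_find_sites : Prop := ∀ (seq : String) (minexon : Int), Dom_find_sites seq minexon → Pre_find_sites seq minexon → Spec_find_sites seq minexon (find_sites seq minexon)

-- ===== LEMMAS AND PROOFS =====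

-- A's one loop with a pair accumulator is the pair of the two single-list loops.
theorem pvFoldSplit (s : List Char) (r : List Int) (d a : List Int) :
    (r.foldl
      (fun (st : List Int × List Int) i =>
        let st1 := if PySem.Chars.slice s (some i) (some (i + 2)) = "GT".toList then (st.1 ++ [i], st.2) else st
        if PySem.Chars.slice s (some i) (some (i + 2)) = "AG".toList then (st1.1, st1.2 ++ [i]) else st1)
      (d, a)) =
    (r.foldl (fun acc i => if PySem.Chars.slice s (some i) (some (i + 2)) = "GT".toList then acc ++ [i] else acc) d,
     r.foldl (fun acc i => if PySem.Chars.slice s (some i) (some (i + 2)) = "AG".toList then acc ++ [i] else acc) a) := by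
  induction r generalizing d a with
  | nil => rfl
  | cons x xs ih =>
    simp only [List.foldl_cons]
    split_ifs <;> exact ih _ _

-- past the end, find gives -1
theorem pvFindFrom_past (s pat : List Char) (k : Int) (hk : (s.length : Int) < k) :
    PySem.Chars.findFrom s pat k = -1 := by
  unfold PySem.Chars.findFrom
  simp only
  split_ifs <;> first | rfl | omega

-- a prefix at a later position is an infix of the earlier drop
theorem pvPrefix_drop_infix (s pat : List Char) (k j : Nat) (hkj : k ≤ j)
    (h : pat <+: s.drop j) : pat <:+: s.drop k := by
  have : s.drop j = (s.drop k).drop (j - k) := by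
    rw [List.drop_drop]; congr 1; omega
  rw [this] at h
  exact h.isInfix.trans (List.drop_suffix _ _).isInfix

-- B's find loop collects exactly the in-window match positions, in increasing order.
theorem pvScan_eq (s pat : List Char) (hpat : pat ≠ []) (stop : Int) :
    ∀ (fuel : Nat) (k : Nat), s.length + 1 - k ≤ fuel →
      scanSites fuel s pat stop (k : Int) =
        (PySem.List.pyRange (k : Int) stop 1).filter (fun i => decide (pat <+: s.drop i.toNat)) := by
  intro fuel
  induction fuel with
  | zero =>
    intro k hk
    rw [scanSites]
    symm
    rw [List.filter_eq_nil_iff]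
    intro i hi
    rw [PySem.List.mem_pyRange_one] at hi
    simp only [decide_eq_true_eq]
    intro hpre
    have : s.drop i.toNat = [] := by
      rw [List.drop_eq_nil_iff]; omega
    rw [this, List.prefix_nil] at hpre
    exact hpat hpre
  | succ fuel ih =>
    intro k hk
    by_cases hkn : s.length < k
    · rw [scanSites]
      simp only [pvFindFrom_past s pat k (by exact_mod_cast hkn)]
      rw [if_pos (Or.inl trivial)]
      symm
      rw [List.filter_eq_nil_iff]
      intro i hi
      rw [PySem.List.mem_pyRange_one] at hi
      simp only [decide_eq_true_eq]
      intro hpre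
      have : s.drop i.toNat = [] := by rw [List.drop_eq_nil_iff]; omega
      rw [this, List.prefix_nil] at hpre
      exact hpat hpre
    · push_neg at hkn
      have hff := PySem.Chars.findFrom_natCast s pat k hkn
      by_cases hr : PySem.Chars.find (s.drop k) pat = -1
      · -- no occurrence at all from k on
        rw [scanSites]
        simp only [hff, if_pos hr]
        rw [if_pos (Or.inl trivial)]
        symm
        rw [List.filter_eq_nil_iff]
        intro i hi
        rw [PySem.List.mem_pyRange_one] at hi
        simp only [decide_eq_true_eq]
        intro hpre
        have hnin := (PySem.Chars.find_eq_neg_one_iff (s.drop k) pat).mp hr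
        exact hnin (pvPrefix_drop_infix s pat k i.toNat (by omega) hpre)
      · -- first occurrence at k + r
        set r := PySem.Chars.find (s.drop k) pat with hrdef
        have hr0 : 0 ≤ r := by have := PySem.Chars.neg_one_le_find (s.drop k) pat; omega
        have hspec := PySem.Chars.find_spec (s := s.drop k) (sub := pat) hr0
        have hdd : (s.drop k).drop r.toNat = s.drop (k + r.toNat) := by rw [List.drop_drop]
        have hmatch : pat <+: s.drop (k + r.toNat) := by rw [← hdd]; exact hspec.1
        have hmin : ∀ j : Nat, k ≤ j → j < k + r.toNat → ¬ pat <+: s.drop j := by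
          intro j hj1 hj2 hc
          refine hspec.2 (j - k) (by omega) ?_
          have : (s.drop k).drop (j - k) = s.drop j := by rw [List.drop_drop]; congr 1; omega
          rw [this]; exact hc
        have hlt : k + r.toNat < s.length := by
          rcases hmatch with ⟨t, ht⟩
          have := congrArg List.length ht
          simp only [List.length_append, List.length_drop] at this
          have hplen : 0 < pat.length := List.length_pos_of_ne_nil hpat
          omega
        have hival : PySem.Chars.findFrom s pat (k : Int) = (k : Int) + r := by
          rw [hff, if_neg hr]
        by_cases hstop : stop ≤ (k : Int) + r
        · rw [scanSites]
          simp only [hival]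
          rw [if_pos (Or.inr hstop)]
          symm
          rw [List.filter_eq_nil_iff]
          intro i hi
          rw [PySem.List.mem_pyRange_one] at hi
          simp only [decide_eq_true_eq]
          intro hpre
          exact hmin i.toNat (by omega) (by omega) hpre
        · push_neg at hstop
          rw [scanSites]
          simp only [hival]
          rw [if_neg (by push_neg; constructor <;> omega)]
          have hsplit : PySem.List.pyRange (k : Int) stop 1 =
              PySem.List.pyRange (k : Int) ((k : Int) + r) 1 ++ PySem.List.pyRange ((k : Int) + r) stop 1 :=
            PySem.List.pyRange_one_append _ _ _ (by omega) (by omega)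
          have hcons : PySem.List.pyRange ((k : Int) + r) stop 1 =
              ((k : Int) + r) :: PySem.List.pyRange ((k : Int) + r + 1) stop 1 :=
            PySem.List.pyRange_one_cons hstop
          rw [hsplit, List.filter_append, hcons]
          have hnil : (PySem.List.pyRange (k : Int) ((k : Int) + r) 1).filter
              (fun i => decide (pat <+: s.drop i.toNat)) = [] := by
            rw [List.filter_eq_nil_iff]
            intro i hi
            rw [PySem.List.mem_pyRange_one] at hi
            simp only [decide_eq_true_eq]
            intro hpre
            exact hmin i.toNat (by omega) (by omega) hpre
          have hkeep : (decide (pat <+: s.drop ((k : Int) + r).toNat)) = true := by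
            simp only [decide_eq_true_eq]
            have : ((k : Int) + r).toNat = k + r.toNat := by omega
            rw [this]; exact hmatch
          rw [List.filter_cons, hkeep, hnil]
          simp only [List.nil_append, if_pos rfl]
          have hrec : ((k : Int) + r + 1) = ((k + r.toNat + 1 : Nat) : Int) := by push_cast; omega
          rw [hrec, ih (k + r.toNat + 1) (by omega)]
          simp

-- the slice test of A is the prefix test of B at nonnegative positions
theorem pvSlice_iff (s pat : List Char) (hpl : pat.length = 2) (i : Int) (hi : 0 ≤ i) :
    (PySem.Chars.slice s (some i) (some (i + 2)) = pat) ↔ (pat <+: s.drop i.toNat) := by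
  rw [PySem.Chars.slice_eq_listSlice, PySem.List.slice_toNat s hi (by omega)]
  have h2 : (i + 2).toNat - i.toNat = 2 := by omega
  rw [h2]
  constructor
  · intro h
    rw [List.prefix_iff_eq_take, hpl]
    exact h.symm
  · intro h
    rw [List.prefix_iff_eq_take, hpl] at h
    exact h.symm

-- ===== VERDICT (by name: the statement is the Claim_ definition above) =====
theorem find_sites_spec : Claim_equal_find_sites := by
  intro seq minexon _hdom hpre
  unfold Spec_find_sites find_sites find_sites_alt
  simp only [PySem.Str.len_eq]
  rw [pvFoldSplit]
  rw [PySem.List.foldl_append_ite_eq_filter (fun i => PySem.Chars.slice seq.toList (some i) (some (i + 2)) = "GT".toList)]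
  rw [PySem.List.foldl_append_ite_eq_filter (fun i => PySem.Chars.slice seq.toList (some i) (some (i + 2)) = "AG".toList)]
  simp only [List.nil_append]
  have hcast : ((minexon.toNat : Nat) : Int) = minexon := by
    have : (0:Int) ≤ minexon := hpre
    omega
  have hscan : ∀ pat : List Char, pat.length = 2 →
      scanSites (seq.toList.length + 2) seq.toList pat ((seq.toList.length : Int) - minexon) minexon =
        (PySem.List.pyRange minexon ((seq.toList.length : Int) - minexon) 1).filter
          (fun i => decide (pat <+: seq.toList.drop i.toNat)) := by
    intro pat hpl
    have h := pvScan_eq seq.toList pat (by intro hc; rw [hc] at hpl; simp at hpl)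
      ((seq.toList.length : Int) - (minexon.toNat : Int)) (seq.toList.length + 2) minexon.toNat (by omega)
    rw [hcast] at h
    exact h
  rw [hscan "GT".toList (by decide), hscan "AG".toList (by decide)]
  congr 1
  congr 1 <;>
  · apply List.filter_congr
    intro i hi
    rw [PySem.List.mem_pyRange_one] at hi
    rw [decide_eq_decide]
    exact pvSlice_iff seq.toList _ (by decide) i (by omega)
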